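-- pv_equiv track=rewrite | github.com/ryan-heslin/Advent_of_Code_2024 | solutions/day21.py | min_turns
-- ===== SOURCE A (Python) =====
-- def min_turns(path):
--     if len(path) < 3:
--         return True
--     prev = path[0]
--     turns = 0
--     for p in path[1:]:
--         turns += p != prev
--         if turns > 1:
--             return False
--         prev = p
--     return True
-- ===== SOURCE B (Python) =====
-- def min_turns(path):
--     if not path:
--         return True
--     c = path.count(path[0])
--     return path == [path[0]] * c + [path[-1]] * (len(path) - c)
-- ===== Notes on version B (the rewrite author's own statement) =====
-- stated objective: alternative
-- what changed: B does not count transitions at all: it reconstructs the only possible <=2-run path from the multiplicity of the first element and the last element ([path[0]]*count + [path[-1]]*rest) and compares it to path for equality, replacing A's stateful transition-counting loop with early return.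
import Mathlib
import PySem

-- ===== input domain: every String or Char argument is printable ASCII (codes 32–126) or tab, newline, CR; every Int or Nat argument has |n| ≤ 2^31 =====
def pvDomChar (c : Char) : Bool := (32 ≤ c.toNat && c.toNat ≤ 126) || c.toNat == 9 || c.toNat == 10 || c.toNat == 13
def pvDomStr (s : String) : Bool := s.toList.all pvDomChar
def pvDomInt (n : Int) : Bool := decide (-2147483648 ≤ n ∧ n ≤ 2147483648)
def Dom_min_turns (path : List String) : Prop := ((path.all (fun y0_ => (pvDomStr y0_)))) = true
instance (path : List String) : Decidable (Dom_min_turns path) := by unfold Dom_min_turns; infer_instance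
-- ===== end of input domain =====

-- B reconstructs the only possible <=2-run path from the count of the first element and the
-- last element and compares it to path, instead of A's transition-counting loop. Objective: alternative.

-- ===== PORT A =====
-- the `for p in path[1:]` loop with early return
def minTurnsLoop (prev : String) (turns : Nat) : List String → Bool
  | [] => true
  | p :: ps =>
    let turns' := turns + (if p != prev then 1 else 0)
    if turns' > 1 then false else minTurnsLoop p turns' ps

def min_turns (path : List String) : Bool :=
  if path.length < 3 then true
  else
    match path with
    | [] => true
    | h :: t => minTurnsLoop h 0 t

-- ===== PORT B =====
-- `path == [path[0]]*c + [path[-1]]*(len(path)-c)` with c = path.count(path[0]);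
-- path[-1] is getLastD (path is nonempty in this branch, so the default is never used)
def min_turns_alt (path : List String) : Bool :=
  match path with
  | [] => true
  | h :: t =>
    let c := (h :: t).count h
    decide ((h :: t) = List.replicate c h ++ List.replicate ((h :: t).length - c) ((h :: t).getLastD h))

-- ===== PRECONDITION & SPEC =====
def Spec_min_turns (path : List String) (out : Bool) : Prop := out = min_turns_alt path
instance (path : List String) (out : Bool) : Decidable (Spec_min_turns path out) := by unfold Spec_min_turns; infer_instance

-- ===== CLAIM (what is proved, stated in full; the proofs are below) =====
def Claim_equal_min_turns : Prop := ∀ (path : List String), Dom_min_turns path → Spec_min_turns path (min_turns path)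

-- ===== LEMMAS AND PROOFS =====

-- number of adjacent transitions starting from prev
def diffs (prev : String) : List String → Nat
  | [] => 0
  | p :: ps => (if p = prev then 0 else 1) + diffs p ps

theorem diffs_le_length (prev : String) (l : List String) : diffs prev l ≤ l.length := by
  induction l generalizing prev with
  | nil => simp [diffs]
  | cons p ps ih =>
    have h1 := ih p
    by_cases h : p = prev
    · subst h; simp [diffs]; omega
    · simp [diffs, h]; omega

theorem minTurnsLoop_eq (l : List String) (prev : String) (turns : Nat) (h : turns ≤ 1) :
    minTurnsLoop prev turns l = decide (turns + diffs prev l ≤ 1) := by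
  induction l generalizing prev turns with
  | nil =>
    simp only [minTurnsLoop, diffs, Nat.add_zero]
    exact (decide_eq_true h).symm
  | cons p ps ih =>
    by_cases hpq : p = prev
    · subst hpq
      have hlt : ¬ (turns > 1) := by omega
      simp only [minTurnsLoop, diffs, bne_self_eq_false, Bool.false_eq_true, if_false,
        if_true, Nat.add_zero, Nat.zero_add, if_neg hlt]
      exact ih p turns h
    · have hb : (p != prev) = true := bne_iff_ne.mpr hpq
      simp only [minTurnsLoop, diffs, hb, if_true, if_neg hpq]
      by_cases ht : turns + 1 > 1
      · rw [if_pos ht]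
        have hnr : ¬ (turns + (1 + diffs p ps) ≤ 1) := by omega
        exact (decide_eq_false hnr).symm
      · rw [if_neg ht, ih p (turns + 1) (by omega)]
        congr 1
        simp only [eq_iff_iff]
        omega

-- A's result equals "at most one transition"
theorem min_turns_eq_diffs (h : String) (t : List String) :
    min_turns (h :: t) = decide (diffs h t ≤ 1) := by
  by_cases hl : (h :: t).length < 3
  · have hle := diffs_le_length h t
    simp only [min_turns, if_pos hl]
    simp at hl
    exact (decide_eq_true (by omega)).symm
  · simp only [min_turns, if_neg hl]
    rw [minTurnsLoop_eq t h 0 (by omega)]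
    simp

theorem diffs_replicate_self (x : String) (n : Nat) : diffs x (List.replicate n x) = 0 := by
  induction n with
  | zero => simp [diffs]
  | succ n ih => simp [List.replicate_succ, diffs, ih]

theorem diffs_replicate (p y : String) (b : Nat) : diffs p (List.replicate b y) ≤ 1 := by
  cases b with
  | zero => simp [diffs]
  | succ b =>
    simp only [List.replicate_succ, diffs, diffs_replicate_self]
    split_ifs <;> omega

theorem diffs_replicate_append (h y : String) (a b : Nat) :
    diffs h (List.replicate a h ++ List.replicate b y) ≤ 1 := by
  induction a with
  | zero => simpa using diffs_replicate h y b
  | succ a ih => simpa [List.replicate_succ, diffs] using ih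

-- forward: a two-block path has at most one transition
theorem alt_imp_diffs (h : String) (t : List String)
    (he : h :: t = List.replicate ((h :: t).count h) h ++
      List.replicate ((h :: t).length - (h :: t).count h) ((h :: t).getLastD h)) :
    diffs h t ≤ 1 := by
  rcases hc : (h :: t).count h with _ | k
  · simp at hc
  · rw [hc, List.replicate_succ, List.cons_append] at he
    injection he with _ ht
    rw [ht]
    exact diffs_replicate_append h _ k _

-- a list with no transitions from p is constantly p
theorem eq_replicate_of_diffs_zero (p : String) (l : List String) (h0 : diffs p l = 0) :
    l = List.replicate l.length p := by
  induction l generalizing p with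
  | nil => simp
  | cons q qs ih =>
    by_cases hq : q = p
    · subst hq
      have hz : diffs q qs = 0 := by simpa [diffs] using h0
      simp only [List.length_cons, List.replicate_succ, List.cons.injEq, true_and]
      exact ih q hz
    · simp [diffs, hq] at h0

-- backward: at most one transition means the path is the two-block reconstruction
theorem diffs_imp_shape (h : String) (t : List String) (hd : diffs h t ≤ 1) :
    ∃ a b y, h :: t = List.replicate (a + 1) h ++ List.replicate b y ∧ (b = 0 ∨ y ≠ h) := by
  induction t generalizing h with
  | nil => exact ⟨0, 0, h, by simp, Or.inl rfl⟩
  | cons p ps ih =>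
    by_cases hp : p = h
    · subst hp
      have hd' : diffs p ps ≤ 1 := by simpa [diffs] using hd
      obtain ⟨a, b, y, hshape, hy⟩ := ih p hd'
      refine ⟨a + 1, b, y, ?_, hy⟩
      rw [List.replicate_succ, List.cons_append, ← hshape]
    · have hd' : diffs p ps = 0 := by simp [diffs, hp] at hd; omega
      have hps := eq_replicate_of_diffs_zero p ps hd'
      refine ⟨0, ps.length + 1, p, ?_, Or.inr hp⟩
      simp only [List.replicate_succ, List.replicate_zero, List.cons_append, List.nil_append,
        List.cons.injEq, true_and]
      exact hps

theorem getLast?_rep_cons (y : String) : ∀ b, (y :: List.replicate b y).getLast? = some y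
  | 0 => rfl
  | b + 1 => by rw [List.replicate_succ, List.getLast?_cons_cons]; exact getLast?_rep_cons y b

theorem getLastD_replicate_append (h y : String) (a b : Nat) (hb : 0 < b) :
    (List.replicate a h ++ List.replicate b y).getLastD h = y := by
  cases b with
  | zero => omega
  | succ b =>
    rw [List.getLastD_eq_getLast?, List.replicate_succ, List.getLast?_append_cons,
      getLast?_rep_cons]
    rfl

theorem diffs_imp_alt (h : String) (t : List String) (hd : diffs h t ≤ 1) :
    h :: t = List.replicate ((h :: t).count h) h ++
      List.replicate ((h :: t).length - (h :: t).count h) ((h :: t).getLastD h) := by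
  obtain ⟨a, b, y, hshape, hy⟩ := diffs_imp_shape h t hd
  rcases hy with hb0 | hyh
  · subst hb0
    simp only [List.replicate_zero, List.append_nil] at hshape
    rw [hshape]
    simp
  · have hcount : (h :: t).count h = a + 1 := by
      rw [hshape, List.count_append, List.count_replicate, List.count_replicate]
      simp [hyh]
    have hlen : (h :: t).length = a + 1 + b := by rw [hshape]; simp
    rw [hcount, hlen]
    cases hb : b with
    | zero =>
      subst hb
      simp only [List.replicate_zero, List.append_nil] at hshape
      simp [hshape]
    | succ b' =>
      have hlast : (h :: t).getLastD h = y := by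
        rw [hshape, hb, getLastD_replicate_append h y (a+1) (b'+1) (by omega)]
      rw [hlast]
      have : a + 1 + (b' + 1) - (a + 1) = b' + 1 := by omega
      rw [this]
      rw [hshape, hb]

theorem min_turns_eq (path : List String) : min_turns path = min_turns_alt path := by
  cases path with
  | nil => simp [min_turns, min_turns_alt]
  | cons h t =>
    rw [min_turns_eq_diffs]
    simp only [min_turns_alt]
    exact decide_eq_decide.mpr ⟨diffs_imp_alt h t, alt_imp_diffs h t⟩

-- ===== VERDICT (by name: the statement is the Claim_ definition above) =====
theorem min_turns_spec : Claim_equal_min_turns := by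
  intro path _
  unfold Spec_min_turns
  exact min_turns_eq path
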